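-- pv_equiv track=rewrite | github.com/trungtranle/python_CSC | ex09_lib_checker.py | checkerboard_create
-- ===== SOURCE A (Python) =====
-- def checkerboard_create(size):
--     checker = ''
--     for i in range(1, size):
--         if i % 2:
--             for j in range(1, size):
--                 if j % 2 == 0:
--                     checker = checker + '|#|'
--                 else:
--                     checker = checker + '| |'
--         else:
--             for j in range(1, size):
--                 if j % 2 == 0:
--                     checker = checker + '| |'
--                 else:
--                     checker = checker + '|#|'
--
--         checker = checker + '\n'
--     return checker
-- ===== SOURCE B (Python) =====
-- def checkerboard_create(size):
--     row_odd = ''.join('|#|' if j % 2 == 0 else '| |' for j in range(1, size))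
--     row_even = ''.join('| |' if j % 2 == 0 else '|#|' for j in range(1, size))
--     return ''.join((row_odd if i % 2 else row_even) + '\n' for i in range(1, size))
-- ===== Notes on version B (the rewrite author's own statement) =====
-- stated objective: simpler
-- what changed: B precomputes the two distinct row-template strings once and joins them per row, replacing A's nested per-cell loops that rebuild every cell of every row by repeated concatenation.
import Mathlib
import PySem

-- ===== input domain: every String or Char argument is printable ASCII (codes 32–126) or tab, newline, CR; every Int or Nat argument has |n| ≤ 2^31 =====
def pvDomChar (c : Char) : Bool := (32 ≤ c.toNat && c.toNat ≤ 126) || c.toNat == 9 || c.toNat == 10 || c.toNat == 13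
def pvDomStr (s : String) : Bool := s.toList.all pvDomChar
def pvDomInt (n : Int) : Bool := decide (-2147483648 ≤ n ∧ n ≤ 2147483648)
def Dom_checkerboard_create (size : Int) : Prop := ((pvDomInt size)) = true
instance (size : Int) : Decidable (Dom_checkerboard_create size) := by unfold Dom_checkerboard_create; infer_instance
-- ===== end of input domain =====

-- B precomputes the two row-template strings once and joins them per row instead of rebuilding every cell; equal output proved.


-- ===== PORT A =====
def checkerboard_create (size : Int) : String :=
  (PySem.List.pyRange 1 size 1).foldl (fun checker i =>
    (if PySem.Int.mod i 2 ≠ 0 then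
      (PySem.List.pyRange 1 size 1).foldl
        (fun c j => if PySem.Int.mod j 2 = 0 then c ++ "|#|" else c ++ "| |") checker
    else
      (PySem.List.pyRange 1 size 1).foldl
        (fun c j => if PySem.Int.mod j 2 = 0 then c ++ "| |" else c ++ "|#|") checker) ++ "\n") ""

-- ===== PORT B =====
def checkerboard_create_alt (size : Int) : String :=
  let row_odd := String.join ((PySem.List.pyRange 1 size 1).map
    (fun j => if PySem.Int.mod j 2 = 0 then "|#|" else "| |"))
  let row_even := String.join ((PySem.List.pyRange 1 size 1).map
    (fun j => if PySem.Int.mod j 2 = 0 then "| |" else "|#|"))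
  String.join ((PySem.List.pyRange 1 size 1).map
    (fun i => (if PySem.Int.mod i 2 ≠ 0 then row_odd else row_even) ++ "\n"))

-- ===== PRECONDITION & SPEC =====
def Spec_checkerboard_create (size : Int) (out : String) : Prop := out = checkerboard_create_alt size
instance (size : Int) (out : String) : Decidable (Spec_checkerboard_create size out) := by unfold Spec_checkerboard_create; infer_instance

-- ===== CLAIM (what is proved, stated in full; the proofs are below) =====
def Claim_equal_checkerboard_create : Prop := ∀ (size : Int), Dom_checkerboard_create size → Spec_checkerboard_create size (checkerboard_create size)

-- ===== LEMMAS AND PROOFS =====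

-- pull the accumulator out of a fold of string appends
theorem pv_foldl_str_pull : ∀ (L : List String) (a : String),
    L.foldl (fun r s => r ++ s) a = a ++ L.foldl (fun r s => r ++ s) "" := by
  intro L
  induction L with
  | nil => intro a; simp
  | cons x xs ih =>
      intro a
      simp only [List.foldl]
      rw [ih (a ++ x), ih ("" ++ x), String.append_assoc]
      simp

-- an inner loop that appends f j per element equals appending the join of the mapped list
theorem pv_foldl_append_join (f : Int → String) :
    ∀ (L : List Int) (init : String),
      L.foldl (fun c j => c ++ f j) init = init ++ String.join (L.map f) := by
  intro L
  induction L with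
  | nil => intro init; simp [String.join]
  | cons x xs ih =>
      intro init
      simp only [List.foldl, List.map, String.join, ih]
      rw [pv_foldl_str_pull (List.map f xs) ("" ++ f x)]
      simp [String.append_assoc]

theorem pv_innerA_odd (L : List Int) (init : String) :
    L.foldl (fun c j => if PySem.Int.mod j 2 = 0 then c ++ "|#|" else c ++ "| |") init
      = init ++ String.join (L.map (fun j => if PySem.Int.mod j 2 = 0 then "|#|" else "| |")) := by
  have h : (fun (c : String) (j : Int) => if PySem.Int.mod j 2 = 0 then c ++ "|#|" else c ++ "| |")
      = fun c j => c ++ (if PySem.Int.mod j 2 = 0 then "|#|" else "| |") := by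
    funext c j; split <;> rfl
  rw [h, pv_foldl_append_join]

theorem pv_innerA_even (L : List Int) (init : String) :
    L.foldl (fun c j => if PySem.Int.mod j 2 = 0 then c ++ "| |" else c ++ "|#|") init
      = init ++ String.join (L.map (fun j => if PySem.Int.mod j 2 = 0 then "| |" else "|#|")) := by
  have h : (fun (c : String) (j : Int) => if PySem.Int.mod j 2 = 0 then c ++ "| |" else c ++ "|#|")
      = fun c j => c ++ (if PySem.Int.mod j 2 = 0 then "| |" else "|#|") := by
    funext c j; split <;> rfl
  rw [h, pv_foldl_append_join]

theorem pv_outer (size : Int) (L : List Int) (init : String) :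
    L.foldl (fun checker i =>
        (if PySem.Int.mod i 2 ≠ 0 then
          (PySem.List.pyRange 1 size 1).foldl
            (fun c j => if PySem.Int.mod j 2 = 0 then c ++ "|#|" else c ++ "| |") checker
        else
          (PySem.List.pyRange 1 size 1).foldl
            (fun c j => if PySem.Int.mod j 2 = 0 then c ++ "| |" else c ++ "|#|") checker) ++ "\n") init
      = init ++ String.join (L.map (fun i =>
          (if PySem.Int.mod i 2 ≠ 0 then
              String.join ((PySem.List.pyRange 1 size 1).map
                (fun j => if PySem.Int.mod j 2 = 0 then "|#|" else "| |"))
            else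
              String.join ((PySem.List.pyRange 1 size 1).map
                (fun j => if PySem.Int.mod j 2 = 0 then "| |" else "|#|"))) ++ "\n")) := by
  have hbody : (fun (checker : String) (i : Int) =>
      (if PySem.Int.mod i 2 ≠ 0 then
        (PySem.List.pyRange 1 size 1).foldl
          (fun c j => if PySem.Int.mod j 2 = 0 then c ++ "|#|" else c ++ "| |") checker
      else
        (PySem.List.pyRange 1 size 1).foldl
          (fun c j => if PySem.Int.mod j 2 = 0 then c ++ "| |" else c ++ "|#|") checker) ++ "\n")
      = fun checker i => checker ++
          ((if PySem.Int.mod i 2 ≠ 0 then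
              String.join ((PySem.List.pyRange 1 size 1).map
                (fun j => if PySem.Int.mod j 2 = 0 then "|#|" else "| |"))
            else
              String.join ((PySem.List.pyRange 1 size 1).map
                (fun j => if PySem.Int.mod j 2 = 0 then "| |" else "|#|"))) ++ "\n") := by
    funext checker i
    split
    · rw [pv_innerA_odd, String.append_assoc]
    · rw [pv_innerA_even, String.append_assoc]
  rw [hbody, pv_foldl_append_join]

-- ===== VERDICT (by name: the statement is the Claim_ definition above) =====
theorem checkerboard_create_spec : Claim_equal_checkerboard_create := by
  intro size _
  unfold Spec_checkerboard_create checkerboard_create checkerboard_create_alt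
  rw [pv_outer size (PySem.List.pyRange 1 size 1) ""]
  simp
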